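-- pv_equiv track=rewrite | github.com/Rainnylxy/dreamschoolAnswer | answer1.py | minSubsequences
-- ===== SOURCE A (Python) =====
-- def minSubsequences(source,target):
--     source_index=0
--     target_index=0
--     subsequences_count = 0
--     found_subsequence = False
--     while target_index < len(target) :
--         #每次都找到target中能匹配到的最大长度的子序列
--         if source[source_index] == target[target_index]:
--             found_subsequence = True
--             target_index+=1
--         source_index+=1
--         #子序列已经匹配完
--         if source_index == len(source):
--             #未匹配到子序列直接返回-1
--             if not found_subsequence :
--                 return -1
--             #子序列已经匹配到，匹配下一个子序列
--             found_subsequence = False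
--             source_index = 0
--             subsequences_count += 1
--     return subsequences_count
-- ===== SOURCE B (Python) =====
-- def minSubsequences(source, target):
--     count = 0
--     pos = 0
--     for c in target:
--         i = source.find(c, pos)
--         if i == -1:
--             i = source.find(c)
--             if i == -1:
--                 return -1
--             count += 1
--         pos = i + 1
--         if pos == len(source):
--             count += 1
--             pos = 0
--     return count
-- ===== Notes on version B (the rewrite author's own statement) =====
-- stated objective: faster
-- what changed: A walks the source one character per interpreted loop iteration with a source pointer and a found flag; B loops over target characters and jumps straight to the next occurrence with str.find(c, pos), wrapping (count += 1) when none remains.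
import Mathlib
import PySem

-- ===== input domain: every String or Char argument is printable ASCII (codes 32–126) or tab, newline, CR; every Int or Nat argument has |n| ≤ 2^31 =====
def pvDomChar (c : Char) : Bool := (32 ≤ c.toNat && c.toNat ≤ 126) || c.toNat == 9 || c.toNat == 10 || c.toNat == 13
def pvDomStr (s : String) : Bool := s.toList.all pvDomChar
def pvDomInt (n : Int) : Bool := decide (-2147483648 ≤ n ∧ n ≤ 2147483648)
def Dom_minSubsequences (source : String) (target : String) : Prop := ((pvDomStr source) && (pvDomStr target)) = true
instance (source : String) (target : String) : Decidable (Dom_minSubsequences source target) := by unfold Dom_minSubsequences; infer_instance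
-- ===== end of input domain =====

-- B replaces A's one-char-at-a-time source pointer + found flag with per-target-char jumps via str.find(c, pos); return value equivalence (no side effects involved).

-- ===== PORT A =====
-- A's while loop: state (source_index, target_index, subsequences_count, found_subsequence).
-- Where Python raises IndexError (source[source_index] with empty source) the port returns -1; those inputs are outside Pre_.
def minSubsequencesLoop (src tgt : List Char) (si ti : Nat) (cnt : Int) (found : Bool) : Int :=
  if hti : ti < tgt.length then
    match hsi : src[si]? with
    | none => -1  -- Python raises IndexError here (excluded by Pre_)
    | some c =>
      if hm : c = tgt[ti] then
        -- found_subsequence = True; target_index += 1; source_index += 1; wrap check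
        if hw : si + 1 = src.length then
          minSubsequencesLoop src tgt 0 (ti + 1) (cnt + 1) false
        else
          minSubsequencesLoop src tgt (si + 1) (ti + 1) cnt true
      else
        if hw : si + 1 = src.length then
          if hf : found then minSubsequencesLoop src tgt 0 ti (cnt + 1) false
          else -1
        else
          minSubsequencesLoop src tgt (si + 1) ti cnt found
  else cnt
termination_by (tgt.length - ti, if found then 2 * src.length - si else src.length - si)
decreasing_by
  · exact Prod.Lex.left _ _ (by omega)
  · exact Prod.Lex.left _ _ (by omega)
  · exact Prod.Lex.right _ (by simp only [hf, if_true, if_false]; omega)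
  · have h1 : si < src.length := (List.getElem?_eq_some_iff.mp hsi).1
    exact Prod.Lex.right _ (by split <;> omega)

def minSubsequences (source : String) (target : String) : Int :=
  minSubsequencesLoop source.toList target.toList 0 0 0 false

-- ===== PORT B =====
-- B: for each target char, jump to its next occurrence with source.find(c, pos); wrap (count += 1) when none remains.
def minSubsequencesAltLoop (src : List Char) (rest : List Char) (pos : Nat) (cnt : Int) : Int :=
  match rest with
  | [] => cnt
  | c :: rest' =>
    let i := PySem.Chars.findFrom src [c] (pos : Int) none
    if i = -1 then
      let i2 := PySem.Chars.find src [c]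
      if i2 = -1 then -1
      else
        let pos' := i2.toNat + 1
        if pos' = src.length then minSubsequencesAltLoop src rest' 0 (cnt + 1 + 1)
        else minSubsequencesAltLoop src rest' pos' (cnt + 1)
    else
      let pos' := i.toNat + 1
      if pos' = src.length then minSubsequencesAltLoop src rest' 0 (cnt + 1)
      else minSubsequencesAltLoop src rest' pos' cnt

def minSubsequences_alt (source : String) (target : String) : Int :=
  minSubsequencesAltLoop source.toList target.toList 0 0

-- ===== PRECONDITION & SPEC =====
-- Pre_ excludes exactly the inputs on which A raises IndexError: empty source with nonempty target.
def Pre_minSubsequences (source : String) (target : String) : Prop :=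
  source ≠ "" ∨ target = ""
instance (source : String) (target : String) : Decidable (Pre_minSubsequences source target) := by
  unfold Pre_minSubsequences; infer_instance

def pvWitness_minSubsequences : String × String := ("ab", "b")

def Spec_minSubsequences (source : String) (target : String) (out : Int) : Prop := out = minSubsequences_alt source target
instance (source : String) (target : String) (out : Int) : Decidable (Spec_minSubsequences source target out) := by unfold Spec_minSubsequences; infer_instance

-- ===== CLAIM (what is proved, stated in full; the proofs are below) =====
def Claim_equal_minSubsequences : Prop := ∀ (source : String) (target : String), Dom_minSubsequences source target → Pre_minSubsequences source target → Spec_minSubsequences source target (minSubsequences source target)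

-- ===== LEMMAS AND PROOFS =====

-- [c] is a prefix of l exactly when l starts with c.
lemma singleton_prefix_iff {c : Char} {l : List Char} : [c] <+: l ↔ l.head? = some c := by
  cases l with
  | nil => simp
  | cons a t => simp [List.cons_prefix_cons, eq_comm]

lemma mem_drop_iff {c : Char} {l : List Char} {pos : Nat} :
    c ∈ l.drop pos ↔ ∃ j, pos ≤ j ∧ j < l.length ∧ l[j]? = some c := by
  rw [List.mem_iff_getElem?]
  constructor
  · rintro ⟨i, hi⟩
    rw [List.getElem?_drop] at hi
    exact ⟨pos + i, by omega, (List.getElem?_eq_some_iff.mp hi).1, hi⟩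
  · rintro ⟨j, hj1, hj2, hj3⟩
    exact ⟨j - pos, by rw [List.getElem?_drop]; rwa [Nat.add_sub_cancel' hj1]⟩

-- source.find(c, pos) = -1 exactly when c does not occur at or after pos.
lemma findFrom_char_none {src : List Char} {c : Char} {pos : Nat} (hpos : pos ≤ src.length) :
    PySem.Chars.findFrom src [c] (pos : Int) none = -1 ↔
      ∀ j, pos ≤ j → j < src.length → ¬ src[j]? = some c := by
  rw [PySem.Chars.findFrom_natCast_eq_neg_one_iff src [c] pos hpos, List.singleton_infix_iff,
    mem_drop_iff]
  constructor
  · intro h j h1 h2 h3; exact h ⟨j, h1, h2, h3⟩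
  · intro h hex; obtain ⟨j, h1, h2, h3⟩ := hex; exact h j h1 h2 h3

-- A successful source.find(c, pos) points at the first occurrence of c at or after pos.
lemma findFrom_char_spec {src : List Char} {c : Char} {pos : Nat} (hpos : pos ≤ src.length)
    (h : PySem.Chars.findFrom src [c] (pos : Int) none ≠ -1) :
    pos ≤ (PySem.Chars.findFrom src [c] (pos : Int) none).toNat ∧
    (PySem.Chars.findFrom src [c] (pos : Int) none).toNat < src.length ∧
    src[(PySem.Chars.findFrom src [c] (pos : Int) none).toNat]? = some c ∧
    ∀ k, pos ≤ k → k < (PySem.Chars.findFrom src [c] (pos : Int) none).toNat →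
      ¬ src[k]? = some c := by
  obtain ⟨h1, h2, h3⟩ := PySem.Chars.findFrom_natCast_spec src [c] pos hpos h
  rw [singleton_prefix_iff, List.head?_drop] at h2
  refine ⟨by omega, (List.getElem?_eq_some_iff.mp h2).1, h2, fun k hk1 hk2 hk3 => ?_⟩
  exact h3 k hk1 hk2 (by rw [singleton_prefix_iff, List.head?_drop]; exact hk3)

-- A's scan from si: if tgt[ti] does not occur at or after si, the pass ends; wrap if something was found, else -1.
lemma scanA_notfound (src tgt : List Char) (ti : Nat) (hti : ti < tgt.length) :
    ∀ n si (cnt : Int) (found : Bool), src.length - si = n → si < src.length →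
      (∀ j, si ≤ j → j < src.length → ¬ src[j]? = some tgt[ti]) →
      minSubsequencesLoop src tgt si ti cnt found =
        if found then minSubsequencesLoop src tgt 0 ti (cnt + 1) false else -1 := by
  intro n
  induction n with
  | zero => intro si cnt found h hsi _; omega
  | succ m ih =>
    intro si cnt found h hsi hnone
    rw [minSubsequencesLoop, dif_pos hti]
    have hget : src[si]? = some src[si] := List.getElem?_eq_getElem hsi
    split
    · simp_all
    · rename_i c heq
      have hc : c = src[si] := by rw [hget] at heq; exact (Option.some_inj.mp heq).symm
      have hnm : ¬ c = tgt[ti] := by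
        intro hcc
        exact hnone si le_rfl hsi (by rw [hget, ← hc, hcc])
      rw [dif_neg hnm]
      by_cases hw : si + 1 = src.length
      · rw [dif_pos hw]
        cases found <;> simp
      · rw [dif_neg hw]
        exact ih (si + 1) cnt found (by omega) (by omega) (fun j hj hj2 => hnone j (by omega) hj2)

-- A's scan from si: if j is the first occurrence of tgt[ti] at or after si, A advances to j+1 (with wrap).
lemma scanA_found (src tgt : List Char) (ti : Nat) (hti : ti < tgt.length) :
    ∀ n si (cnt : Int) (found : Bool) j, j - si = n → si ≤ j → j < src.length →
      src[j]? = some tgt[ti] →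
      (∀ k, si ≤ k → k < j → ¬ src[k]? = some tgt[ti]) →
      minSubsequencesLoop src tgt si ti cnt found =
        if j + 1 = src.length then minSubsequencesLoop src tgt 0 (ti + 1) (cnt + 1) false
        else minSubsequencesLoop src tgt (j + 1) (ti + 1) cnt true := by
  intro n
  induction n with
  | zero =>
    intro si cnt found j h hle hj hcj hmin
    have hsj : si = j := by omega
    subst hsj
    rw [minSubsequencesLoop, dif_pos hti]
    split
    · simp_all
    · rename_i c heq
      have hc : c = tgt[ti] := by rw [hcj] at heq; exact (Option.some_inj.mp heq).symm
      rw [dif_pos hc]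
      by_cases hw : si + 1 = src.length <;> simp [hw]
  | succ m ih =>
    intro si cnt found j h hle hj hcj hmin
    have hlt : si < j := by omega
    rw [minSubsequencesLoop, dif_pos hti]
    have hsi : si < src.length := by omega
    have hget : src[si]? = some src[si] := List.getElem?_eq_getElem hsi
    split
    · simp_all
    · rename_i c heq
      have hc : c = src[si] := by rw [hget] at heq; exact (Option.some_inj.mp heq).symm
      have hnm : ¬ c = tgt[ti] := by
        intro hcc
        exact hmin si le_rfl hlt (by rw [hget, ← hc, hcc])
      rw [dif_neg hnm, dif_neg (by omega : ¬ si + 1 = src.length)]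
      exact ih (si + 1) cnt found j (by omega) (by omega) hj hcj
        (fun k hk hk2 => hmin k (by omega) hk2)

-- Main loop correspondence: A's pointer state (pos, found = (0 < pos)) against B's per-char jumps.
lemma mainLoop (src tgt : List Char) (hL : 0 < src.length) :
    ∀ n ti pos (cnt : Int), tgt.length - ti ≤ n → pos < src.length →
      minSubsequencesLoop src tgt pos ti cnt (decide (0 < pos)) =
        minSubsequencesAltLoop src (tgt.drop ti) pos cnt := by
  intro n
  induction n with
  | zero =>
    intro ti pos cnt hn hpos
    have hge : tgt.length ≤ ti := by omega
    rw [minSubsequencesLoop, dif_neg (by omega : ¬ ti < tgt.length),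
      List.drop_eq_nil_of_le hge, minSubsequencesAltLoop]
  | succ m ih =>
    intro ti pos cnt hn hpos
    by_cases hti : ti < tgt.length
    case neg =>
      rw [minSubsequencesLoop, dif_neg hti,
        List.drop_eq_nil_of_le (by omega), minSubsequencesAltLoop]
    case pos =>
    have hdrop : tgt.drop ti = tgt[ti] :: tgt.drop (ti + 1) := (List.getElem_cons_drop hti).symm
    rw [hdrop, minSubsequencesAltLoop]
    simp only []
    by_cases hff : PySem.Chars.findFrom src [tgt[ti]] (pos : Int) none = -1
    case neg =>
      -- first occurrence r of tgt[ti] at or after pos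
      rw [if_neg hff]
      obtain ⟨hr1, hr2, hr3, hr4⟩ := findFrom_char_spec (le_of_lt hpos) hff
      set r := (PySem.Chars.findFrom src [tgt[ti]] (pos : Int) none).toNat with hrdef
      rw [scanA_found src tgt ti hti (r - pos) pos cnt _ r rfl hr1 hr2 hr3 hr4]
      by_cases hw : r + 1 = src.length
      · rw [if_pos hw, if_pos hw]
        have := ih (ti + 1) 0 (cnt + 1) (by omega) hL
        simpa using this
      · rw [if_neg hw, if_neg hw]
        have := ih (ti + 1) (r + 1) cnt (by omega) (by omega)
        simpa using this
    case pos =>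
      rw [if_pos hff]
      have hnone := (findFrom_char_none (le_of_lt hpos)).mp hff
      by_cases hf2 : PySem.Chars.find src [tgt[ti]] = -1
      · -- tgt[ti] occurs nowhere in src: both return -1
        rw [if_pos hf2]
        have hnone0 : ∀ j, (0:Nat) ≤ j → j < src.length → ¬ src[j]? = some tgt[ti] := by
          have := (findFrom_char_none (c := tgt[ti]) (pos := 0) (by omega)).mp
            (by simpa [PySem.Chars.findFrom_zero] using hf2)
          simpa using this
        by_cases hp0 : 0 < pos
        · rw [scanA_notfound src tgt ti hti (src.length - pos) pos cnt _ rfl hpos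
            (fun j h1 h2 => hnone j h1 h2)]
          simp only [hp0, decide_true, if_true]
          rw [scanA_notfound src tgt ti hti src.length 0 (cnt + 1) false rfl hL
            (fun j h1 h2 => hnone0 j h1 h2)]
          simp
        · have hpz : pos = 0 := by omega
          subst hpz
          rw [scanA_notfound src tgt ti hti src.length 0 cnt _ rfl hL
            (fun j h1 h2 => hnone0 j h1 h2)]
          simp
      · -- tgt[ti] occurs in src, but only before pos: wrap, then jump to the first occurrence
        rw [if_neg hf2]
        have hf2' : PySem.Chars.findFrom src [tgt[ti]] ((0:Nat) : Int) none ≠ -1 := by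
          simpa [PySem.Chars.findFrom_zero] using hf2
        obtain ⟨_, hj2, hj3, hj4⟩ := findFrom_char_spec (pos := 0) (by omega) hf2'
        have hjeq : (PySem.Chars.findFrom src [tgt[ti]] ((0:Nat) : Int) none).toNat
            = (PySem.Chars.find src [tgt[ti]]).toNat := by
          simp [PySem.Chars.findFrom_zero]
        rw [hjeq] at hj2 hj3 hj4
        set j0 := (PySem.Chars.find src [tgt[ti]]).toNat with hj0def
        have hj0pos : j0 < pos := by
          by_contra hcon
          exact hnone j0 (by omega) hj2 hj3
        have hp0 : 0 < pos := by omega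
        rw [scanA_notfound src tgt ti hti (src.length - pos) pos cnt _ rfl hpos
          (fun j h1 h2 => hnone j h1 h2)]
        simp only [hp0, decide_true, if_true]
        rw [scanA_found src tgt ti hti j0 0 (cnt + 1) false j0 rfl (by omega) hj2 hj3
          (fun k hk1 hk2 => hj4 k hk1 hk2)]
        have hnw : ¬ j0 + 1 = src.length := by omega
        rw [if_neg hnw, if_neg hnw]
        have := ih (ti + 1) (j0 + 1) (cnt + 1) (by omega) (by omega)
        simpa using this

-- ===== VERDICT (by name: the statement is the Claim_ definition above) =====
theorem minSubsequences_spec : Claim_equal_minSubsequences := by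
  intro source target _ hpre
  unfold Spec_minSubsequences minSubsequences minSubsequences_alt
  by_cases ht : target.toList = []
  · rw [ht, minSubsequencesLoop, minSubsequencesAltLoop]
    simp
  · have hs : source.toList ≠ [] := by
      rcases hpre with h | h
      · intro hnil
        exact h (String.toList_inj.mp (by simp [hnil]))
      · exact absurd (by rw [h]; rfl) ht
    have hL : 0 < source.toList.length := List.length_pos_iff.mpr hs
    have := mainLoop source.toList target.toList hL target.toList.length 0 0 0 (by omega) hL
    simpa using this
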